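-- pv_equiv track=rewrite | github.com/vlad777442/adv-database-ceph | evaluation/evaluation_framework.py | _intent_matches
-- ===== SOURCE A (Python) =====
-- def _intent_matches(predicted: str, expected: str) -> bool:
--     """Check if predicted intent matches expected."""
--     # Normalize intents for comparison
--     predicted = predicted.lower().replace("_", "").replace("-", "")
--     expected = expected.lower().replace("_", "").replace("-", "")
--
--     # Direct match
--     if predicted == expected:
--         return True
--
--     # Partial match (handle variations)
--     intent_aliases = {
--         "semanticsearch": ["search", "searchobjects", "findfiles"],
--         "readobject": ["read", "showobject", "getobject"],
--         "listobjects": ["list", "ls", "showobjects"],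
--         "createobject": ["create", "write", "makeobject"],
--         "deleteobject": ["delete", "remove", "rm"],
--         "clusterhealth": ["health", "clusterstatus", "status"],
--         "searchdocs": ["documentation", "help", "explain"],
--         "getstats": ["poolstats", "statistics", "stats"],
--         "explainissue": ["explain", "troubleshoot"],
--         "pgstatus": ["placementgroups", "pginfo"],
--     }
--
--     for canonical, aliases in intent_aliases.items():
--         if expected == canonical or expected in aliases:
--             if predicted == canonical or predicted in aliases:
--                 return True
--
--     return False
-- ===== SOURCE B (Python) =====
-- _INTENT_ALIASES = {
--     "semanticsearch": ["search", "searchobjects", "findfiles"],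
--     "readobject": ["read", "showobject", "getobject"],
--     "listobjects": ["list", "ls", "showobjects"],
--     "createobject": ["create", "write", "makeobject"],
--     "deleteobject": ["delete", "remove", "rm"],
--     "clusterhealth": ["health", "clusterstatus", "status"],
--     "searchdocs": ["documentation", "help", "explain"],
--     "getstats": ["poolstats", "statistics", "stats"],
--     "explainissue": ["explain", "troubleshoot"],
--     "pgstatus": ["placementgroups", "pginfo"],
-- }
--
-- # Reverse index built once: each term (canonical or alias) -> set of canonical
-- # group names containing it ('explain' -> {'searchdocs', 'explainissue'}).
-- _INDEX = {}
-- for _canonical, _aliases in _INTENT_ALIASES.items():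
--     for _term in (_canonical, *_aliases):
--         _INDEX.setdefault(_term, set()).add(_canonical)
--
--
-- def _intent_matches(predicted: str, expected: str) -> bool:
--     """Check if predicted intent matches expected."""
--     predicted = predicted.lower().replace("_", "").replace("-", "")
--     expected = expected.lower().replace("_", "").replace("-", "")
--     if predicted == expected:
--         return True
--     return not _INDEX.get(expected, set()).isdisjoint(_INDEX.get(predicted, set()))
-- ===== Notes on version B (the rewrite author's own statement) =====
-- stated objective: idiomatic
-- what changed: Replaces the per-call loop over all alias groups with double membership tests by a reverse index (term -> set of group names) built once at module load, so a call is two dict lookups plus a set-disjointness test.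
import Mathlib
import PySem

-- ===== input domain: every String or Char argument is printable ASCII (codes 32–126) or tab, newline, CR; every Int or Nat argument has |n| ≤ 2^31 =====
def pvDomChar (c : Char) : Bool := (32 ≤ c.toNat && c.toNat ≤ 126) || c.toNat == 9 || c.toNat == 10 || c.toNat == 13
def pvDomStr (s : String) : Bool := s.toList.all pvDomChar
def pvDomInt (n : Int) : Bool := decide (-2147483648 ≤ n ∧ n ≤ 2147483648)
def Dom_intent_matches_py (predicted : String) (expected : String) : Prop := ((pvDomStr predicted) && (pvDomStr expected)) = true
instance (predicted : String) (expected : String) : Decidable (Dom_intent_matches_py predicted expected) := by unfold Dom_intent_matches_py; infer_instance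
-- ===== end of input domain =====

-- B replaces A's per-call loop over the alias groups by a reverse index (term -> set of
-- canonical group names) built once, then two lookups and a set-disjointness test (idiomatic).

-- ===== PORT A =====

-- shared data: the literal alias table from the Python source
def pvIntentAliases : List (String × List String) :=
  [("semanticsearch", ["search", "searchobjects", "findfiles"]),
   ("readobject", ["read", "showobject", "getobject"]),
   ("listobjects", ["list", "ls", "showobjects"]),
   ("createobject", ["create", "write", "makeobject"]),
   ("deleteobject", ["delete", "remove", "rm"]),
   ("clusterhealth", ["health", "clusterstatus", "status"]),
   ("searchdocs", ["documentation", "help", "explain"]),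
   ("getstats", ["poolstats", "statistics", "stats"]),
   ("explainissue", ["explain", "troubleshoot"]),
   ("pgstatus", ["placementgroups", "pginfo"])]

-- s.lower().replace("_", "").replace("-", "")
def pvNormalize (s : String) : String :=
  PySem.Str.replace (PySem.Str.replace (PySem.Str.lower s) "_" "") "-" ""

-- A's 'for canonical, aliases in intent_aliases.items(): …' with its early return
def pvLoopA (predicted expected : String) : List (String × List String) → Bool
  | [] => false
  | (canonical, aliases) :: rest =>
      if expected == canonical || aliases.contains expected then
        if predicted == canonical || aliases.contains predicted then true
        else pvLoopA predicted expected rest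
      else pvLoopA predicted expected rest

def intent_matches_py (predicted : String) (expected : String) : Bool :=
  let predicted := pvNormalize predicted
  let expected := pvNormalize expected
  if predicted == expected then true
  else pvLoopA predicted expected pvIntentAliases

-- ===== PORT B =====

-- the reverse index built once: _INDEX.setdefault(term, set()).add(canonical)
def pvIndex : PySem.Dict String (PySem.Set String) :=
  pvIntentAliases.foldl
    (fun d pr =>
      (pr.1 :: pr.2).foldl
        (fun d term => d.modify term PySem.Set.empty (fun s => PySem.Set.add s pr.1)) d)
    PySem.Dict.empty

def intent_matches_py_alt (predicted : String) (expected : String) : Bool :=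
  let predicted := pvNormalize predicted
  let expected := pvNormalize expected
  if predicted == expected then true
  else
    !(PySem.Set.isdisjoint (pvIndex.getD expected PySem.Set.empty)
        (pvIndex.getD predicted PySem.Set.empty))

-- ===== PRECONDITION & SPEC =====
def Spec_intent_matches_py (predicted : String) (expected : String) (out : Bool) : Prop := out = intent_matches_py_alt predicted expected
instance (predicted : String) (expected : String) (out : Bool) : Decidable (Spec_intent_matches_py predicted expected out) := by unfold Spec_intent_matches_py; infer_instance

-- ===== CLAIM (what is proved, stated in full; the proofs are below) =====
def Claim_equal_intent_matches_py : Prop := ∀ (predicted : String) (expected : String), Dom_intent_matches_py predicted expected → Spec_intent_matches_py predicted expected (intent_matches_py predicted expected)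

-- ===== LEMMAS AND PROOFS =====

-- A's loop returns true iff some group contains both (normalized) strings
theorem pvLoopA_eq_true_iff (p e : String) (tbl : List (String × List String)) :
    pvLoopA p e tbl = true ↔
      ∃ pr ∈ tbl, (e = pr.1 ∨ e ∈ pr.2) ∧ (p = pr.1 ∨ p ∈ pr.2) := by
  induction tbl with
  | nil => simp [pvLoopA]
  | cons hd rest ih =>
    obtain ⟨c, al⟩ := hd
    simp only [pvLoopA]
    split_ifs with h1 h2
    · simp only [Bool.or_eq_true, beq_iff_eq, List.contains_iff_mem] at h1 h2
      simp only [true_iff]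
      exact ⟨(c, al), List.mem_cons_self, h1, h2⟩
    · simp only [Bool.or_eq_true, beq_iff_eq, List.contains_iff_mem] at h1 h2
      rw [ih]
      constructor
      · rintro ⟨pr, hm, hc⟩; exact ⟨pr, List.mem_cons_of_mem _ hm, hc⟩
      · rintro ⟨pr, hm, hc⟩
        rcases List.mem_cons.mp hm with rfl | hm'
        · exact absurd hc.2 h2
        · exact ⟨pr, hm', hc⟩
    · simp only [Bool.or_eq_true, beq_iff_eq, List.contains_iff_mem] at h1
      rw [ih]
      constructor
      · rintro ⟨pr, hm, hc⟩; exact ⟨pr, List.mem_cons_of_mem _ hm, hc⟩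
      · rintro ⟨pr, hm, hc⟩
        rcases List.mem_cons.mp hm with rfl | hm'
        · exact absurd hc.1 h1
        · exact ⟨pr, hm', hc⟩

-- membership after the inner loop 'for term in (canonical, *aliases): index[term].add(canonical)'
theorem pv_mem_inner (c : String) (canon : String) (terms : List String) (t : String)
    (d : PySem.Dict String (PySem.Set String)) :
    (c ∈ (terms.foldl
        (fun d term => d.modify term PySem.Set.empty (fun s => PySem.Set.add s canon)) d).getD
          t PySem.Set.empty) ↔
      c ∈ d.getD t PySem.Set.empty ∨ (c = canon ∧ t ∈ terms) := by
  induction terms generalizing d with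
  | nil => simp
  | cons hd tl ih =>
    simp only [List.foldl_cons, ih, PySem.Dict.getD_modify]
    by_cases ht : t = hd
    · subst ht
      simp [PySem.Set.mem_add]
      tauto
    · simp [ht]

-- membership in the full reverse index
theorem pv_mem_index_fold (c t : String) (tbl : List (String × List String))
    (d : PySem.Dict String (PySem.Set String)) :
    (c ∈ (tbl.foldl
        (fun d pr =>
          (pr.1 :: pr.2).foldl
            (fun d term => d.modify term PySem.Set.empty (fun s => PySem.Set.add s pr.1)) d)
          d).getD t PySem.Set.empty) ↔
      c ∈ d.getD t PySem.Set.empty ∨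
        ∃ pr ∈ tbl, c = pr.1 ∧ (t = pr.1 ∨ t ∈ pr.2) := by
  induction tbl generalizing d with
  | nil => simp
  | cons hd tl ih =>
    rw [List.foldl_cons, ih, pv_mem_inner]
    simp only [List.mem_cons]
    constructor
    · rintro (((h | ⟨rfl, ht⟩) | ⟨pr, hm, hc⟩))
      · exact Or.inl h
      · exact Or.inr ⟨hd, Or.inl rfl, rfl, ht⟩
      · exact Or.inr ⟨pr, Or.inr hm, hc⟩
    · rintro (h | ⟨pr, (rfl | hm), hc⟩)
      · exact Or.inl (Or.inl h)
      · exact Or.inl (Or.inr ⟨hc.1, hc.2⟩)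
      · exact Or.inr ⟨pr, hm, hc⟩

theorem pv_mem_index (c t : String) :
    c ∈ pvIndex.getD t PySem.Set.empty ↔
      ∃ pr ∈ pvIntentAliases, c = pr.1 ∧ (t = pr.1 ∨ t ∈ pr.2) := by
  unfold pvIndex
  rw [pv_mem_index_fold]
  simp [PySem.Dict.getD_empty, PySem.Set.empty]

-- canonical names (Python dict keys) are pairwise distinct
theorem pvAliases_fst_nodup : (pvIntentAliases.map Prod.fst).Nodup := by decide

-- ===== VERDICT (by name: the statement is the Claim_ definition above) =====
theorem intent_matches_py_spec : Claim_equal_intent_matches_py := by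
  intro predicted expected _
  unfold Spec_intent_matches_py intent_matches_py intent_matches_py_alt
  set p := pvNormalize predicted
  set e := pvNormalize expected
  by_cases hpe : p == e
  · simp [hpe]
  · simp only [hpe, Bool.false_eq_true, if_false]
    rw [Bool.eq_iff_iff, pvLoopA_eq_true_iff, Bool.not_eq_true',
        ← Bool.not_eq_true, PySem.Set.isdisjoint_iff]
    push Not
    constructor
    · rintro ⟨pr, hm, ⟨he, hp⟩⟩
      exact ⟨pr.1, (pv_mem_index pr.1 e).mpr ⟨pr, hm, rfl, he⟩,
             (pv_mem_index pr.1 p).mpr ⟨pr, hm, rfl, hp⟩⟩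
    · rintro ⟨c, hce, hcp⟩
      obtain ⟨pr, hm, rfl, he⟩ := (pv_mem_index c e).mp hce
      obtain ⟨pr', hm', hc', hp'⟩ := (pv_mem_index pr.1 p).mp hcp
      -- canonical names in the table are distinct (Python dict keys), so pr = pr'
      have hpr : pr = pr' := List.inj_on_of_nodup_map pvAliases_fst_nodup hm hm' hc'
      exact ⟨pr, hm, he, hpr ▸ hp'⟩
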